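-- pv_equiv track=rewrite | github.com/aaditjainofficial360/Python_Projects | Python Challenges/Challenge4.py | tail_match
-- ===== SOURCE A (Python) =====
-- def tail_match(lst):
--     if lst!=[]:
--         result={}
--         for i in lst:
--             if int(str(i)[-1]) not in result:
--                 result.update({int(str(i)[-1]):[i]})
--             else:
--                 result[int(str(i)[-1])].append(i)
--         return result
--     else:
--         return -1
-- ===== SOURCE B (Python) =====
-- def tail_match(lst):
--     if lst == []:
--         return -1
--     key = lambda i: int(str(i)[-1])
--     keys = list(dict.fromkeys(key(i) for i in lst))
--     return {k: [i for i in lst if key(i) == k] for k in keys}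
-- ===== Notes on version B (the rewrite author's own statement) =====
-- stated objective: alternative
-- what changed: B replaces A's single-pass incremental dict (membership test + in-place append) with a two-phase grouping: an ordered dedup of the keys via dict.fromkeys, then a dict comprehension filtering the whole list once per distinct key.
-- outside the precondition, e.g. on tail_match([]): A returns -1, B returns -1
import Mathlib
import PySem

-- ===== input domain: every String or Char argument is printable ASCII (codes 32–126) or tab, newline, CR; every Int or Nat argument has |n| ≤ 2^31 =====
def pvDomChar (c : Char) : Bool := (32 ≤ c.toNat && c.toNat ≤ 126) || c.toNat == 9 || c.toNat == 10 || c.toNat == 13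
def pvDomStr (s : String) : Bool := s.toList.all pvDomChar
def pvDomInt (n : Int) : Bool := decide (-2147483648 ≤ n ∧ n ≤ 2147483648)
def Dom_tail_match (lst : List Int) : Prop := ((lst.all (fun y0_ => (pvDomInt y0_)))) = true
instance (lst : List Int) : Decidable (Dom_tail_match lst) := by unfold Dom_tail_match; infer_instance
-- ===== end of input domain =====

-- B re-groups by ordered distinct keys + one filter pass per key instead of A's incremental dict;
-- equivalence is about the RETURN value; the empty list (where both Pythons return -1, not a dict) is outside Pre_.

-- ===== PORT A =====
-- shared key helper: int(str(i)[-1]); the defaults are never hit (str(i) is nonempty and ends in a digit)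
def pvKey (i : Int) : Int :=
  match PySem.Str.pyGet? (PySem.Int.toStr i) (-1) with
  | some c => (PySem.Int.ofChars? [c]).getD 0
  | none => 0

def tail_match (lst : List Int) : List (Int × List Int) :=
  if lst ≠ [] then
    (lst.foldl (fun result i =>
        if result.contains (pvKey i) = false then
          result.insert (pvKey i) [i]
        else
          result.modify (pvKey i) [] (fun v => v ++ [i]))
      PySem.Dict.empty).items
  else []   -- Python returns -1 here (not a dict); excluded by Pre_

-- ===== PORT B =====
def tail_match_alt (lst : List Int) : List (Int × List Int) :=
  if lst = [] then []   -- Python returns -1 here (not a dict); excluded by Pre_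
  else
    (PySem.List.dedup (lst.map pvKey)).map
      (fun k => (k, lst.filter (fun i => pvKey i == k)))

-- ===== PRECONDITION & SPEC =====
-- Pre_ excludes only the empty list, on which both Pythons return -1, which is not a value of the declared dict type.
def Pre_tail_match (lst : List Int) : Prop := lst ≠ []
instance (lst : List Int) : Decidable (Pre_tail_match lst) := by unfold Pre_tail_match; infer_instance
def pvWitness_tail_match : List Int := ([7, -15, 20, 3])

def Spec_tail_match (lst : List Int) (out : List (Int × List Int)) : Prop := out = tail_match_alt lst
instance (lst : List Int) (out : List (Int × List Int)) : Decidable (Spec_tail_match lst out) := by unfold Spec_tail_match; infer_instance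

-- ===== CLAIM (what is proved, stated in full; the proofs are below) =====
def Claim_equal_tail_match : Prop := ∀ (lst : List Int), Dom_tail_match lst → Pre_tail_match lst → Spec_tail_match lst (tail_match lst)

-- ===== LEMMAS AND PROOFS =====

-- A's branched loop body is exactly dict.modify (both branches append the new element at the key)
lemma pvStep_eq (d : PySem.Dict Int (List Int)) (i : Int) :
    (if d.contains (pvKey i) = false then
        d.insert (pvKey i) [i]
      else
        d.modify (pvKey i) [] (fun v => v ++ [i]))
    = d.modify (pvKey i) [] (fun v => v ++ [i]) := by
  by_cases h : d.contains (pvKey i) = false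
  · simp [PySem.Dict.modify, PySem.Dict.getD_of_not_contains, h]
  · simp [h]

lemma pvSetUpdate_nil_eq_dedup (l : List Int) :
    PySem.Set.update ([] : List Int) l = PySem.List.dedup l := by
  rfl

-- ===== VERDICT (by name: the statement is the Claim_ definition above) =====

theorem tail_match_spec : Claim_equal_tail_match := by
  intro lst _hdom hpre
  have hne : lst ≠ [] := hpre
  unfold Spec_tail_match tail_match tail_match_alt
  rw [if_pos hne, if_neg hne]
  have hstep : (fun (d : PySem.Dict Int (List Int)) (i : Int) =>
      if d.contains (pvKey i) = false then d.insert (pvKey i) [i]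
      else d.modify (pvKey i) [] (fun v => v ++ [i]))
      = (fun d i => d.modify (pvKey i) [] (fun v => v ++ [i])) := by
    funext d i; exact pvStep_eq d i
  rw [hstep]
  have hmap : lst.foldl (fun d i => d.modify (pvKey i) [] (fun v => v ++ [i])) PySem.Dict.empty
      = (lst.map (fun i => (pvKey i, i))).foldl
          (fun d p => d.modify p.1 [] (fun v => v ++ [p.2])) PySem.Dict.empty := by
    rw [List.foldl_map]
  rw [hmap]
  set pairs := lst.map (fun i => (pvKey i, i)) with hpairs
  set D := pairs.foldl (fun d p => d.modify p.1 [] (fun v => v ++ [p.2])) PySem.Dict.empty with hD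
  have hkeys : D.keys = PySem.List.dedup (lst.map pvKey) := by
    rw [hD]
    have := PySem.Dict.keys_foldl_modify_key pairs Prod.fst []
      (fun d p v => v ++ [p.2]) PySem.Dict.empty
    simp only at this
    rw [this, PySem.Dict.keys_empty, pvSetUpdate_nil_eq_dedup, hpairs, List.map_map]
    rfl
  have hnodup : D.keys.Nodup := by
    rw [hkeys]; exact PySem.List.nodup_dedup _
  have hget : ∀ k, D.getD k [] = lst.filter (fun i => pvKey i == k) := by
    intro k
    rw [hD, PySem.Dict.getD_foldl_modify_append pairs PySem.Dict.empty k,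
      PySem.Dict.getD_empty, hpairs]
    simp [List.filter_map, Function.comp_def]
  rw [PySem.Dict.items_eq_map_keys D hnodup [], hkeys]
  exact List.map_congr_left (fun k _ => by rw [hget k])
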